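-- pv_equiv track=rewrite | github.com/KaneOrca/ClawSeat | core/scripts/modal_detector.py | _parse_session_name
-- ===== SOURCE A (Python) =====
-- def _parse_session_name(session: str) -> tuple[str, str]:
--     """Parse tmux session name into (project, seat).
--
--     Examples:
--       install-builder-2-claude  → (install, builder-2)
--       myproject-planner-claude  → (myproject, planner)
--       ancestor-cc               → (ancestor, cc)
--     """
--     # Strip known tool suffixes (-claude, -codex, -cc) only when enough
--     # parts remain so we don't consume the seat name.
--     name = session
--     for suffix in ("-claude", "-codex", "-cc"):
--         if name.endswith(suffix):
--             candidate = name[: -len(suffix)]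
--             if "-" in candidate:  # still has project-seat structure
--                 name = candidate
--             break
--     parts = name.split("-", 1)
--     if len(parts) == 2:
--         return parts[0], parts[1]
--     return name, name
-- ===== SOURCE B (Python) =====
-- def _parse_session_name(session: str) -> tuple[str, str]:
--     parts = session.split("-")
--     if len(parts) >= 3 and parts[-1] in ("claude", "codex", "cc"):
--         parts = parts[:-1]
--     if len(parts) >= 2:
--         return parts[0], "-".join(parts[1:])
--     return session, session
-- ===== Notes on version B (the rewrite author's own statement) =====
-- stated objective: simpler
-- what changed: Replaces the endswith-loop plus one-bounded split with a single full tokenization on the hyphen separator: drop the last token when there are at least three tokens and it names a tool, then reassemble (head, join of the rest).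
import Mathlib
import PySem

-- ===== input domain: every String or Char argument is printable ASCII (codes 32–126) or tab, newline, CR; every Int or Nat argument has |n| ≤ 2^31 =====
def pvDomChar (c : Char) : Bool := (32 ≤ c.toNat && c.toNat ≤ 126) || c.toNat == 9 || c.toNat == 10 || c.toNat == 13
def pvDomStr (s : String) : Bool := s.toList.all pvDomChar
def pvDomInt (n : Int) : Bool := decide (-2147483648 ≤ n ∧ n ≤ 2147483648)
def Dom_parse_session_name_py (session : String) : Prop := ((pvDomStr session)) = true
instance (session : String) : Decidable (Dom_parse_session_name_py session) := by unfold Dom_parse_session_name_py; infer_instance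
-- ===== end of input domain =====

-- B re-decomposes A's endswith-loop + split-once as one full tokenization on the hyphen separator (simpler; same cost).

-- ===== PORT A =====
-- A's for-loop over the suffix tuple, with Python's break: the first matching suffix decides.
def pvStripLoop : List String → String → String
  | [], name => name
  | suf :: rest, name =>
    if PySem.Str.endswith name suf then
      (let candidate := PySem.Str.slice name none (some (-(PySem.Str.len suf)))
       if PySem.Str.isIn "-" candidate then candidate else name)
    else pvStripLoop rest name

def parse_session_name_py (session : String) : String × String :=
  let name := pvStripLoop ["-claude", "-codex", "-cc"] session
  let parts := (PySem.Str.splitMax? name "-" 1).getD []  -- sep "-" is nonempty: never none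
  if parts.length = 2 then
    ((PySem.List.pyGet? parts 0).getD "", (PySem.List.pyGet? parts 1).getD "")  -- indices in range (length = 2)
  else (name, name)

-- ===== PORT B =====
def parse_session_name_py_alt (session : String) : String × String :=
  let parts0 := (PySem.Str.split? session "-").getD []  -- sep "-" is nonempty: never none
  let parts := if 3 ≤ parts0.length ∧
                  (PySem.List.pyGet? parts0 (-1) = some "claude" ∨
                   PySem.List.pyGet? parts0 (-1) = some "codex" ∨
                   PySem.List.pyGet? parts0 (-1) = some "cc")
               then PySem.List.slice parts0 none (some (-1)) else parts0
  if 2 ≤ parts.length then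
    ((PySem.List.pyGet? parts 0).getD "", PySem.Str.join "-" (PySem.List.slice parts (some 1) none))
  else (session, session)

-- ===== PRECONDITION & SPEC =====
def Spec_parse_session_name_py (session : String) (out : String × String) : Prop := out = parse_session_name_py_alt session
instance (session : String) (out : String × String) : Decidable (Spec_parse_session_name_py session out) := by unfold Spec_parse_session_name_py; infer_instance

-- ===== CLAIM (what is proved, stated in full; the proofs are below) =====
def Claim_equal_parse_session_name_py : Prop := ∀ (session : String), Dom_parse_session_name_py session → Spec_parse_session_name_py session (parse_session_name_py session)

-- ===== LEMMAS AND PROOFS =====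

-- Spec-side split on the single hyphen separator (proof helper; neither port uses it).
def spA : List Char → List (List Char)
  | [] => [[]]
  | c :: t => if c = '-' then [] :: spA t
              else match spA t with
                   | p :: ps => (c :: p) :: ps
                   | [] => [[c]]

-- split at the FIRST '-' (models maxsplit = 1)
def sp1 : List Char → List Char × Option (List Char)
  | [] => ([], none)
  | c :: t => if c = '-' then ([], some t) else ((c :: (sp1 t).1), (sp1 t).2)

-- the common final assembly both ports compute, as a function of the pieces
def canon (orig : String) (qs : List (List Char)) : String × String :=
  match qs with
  | a :: b :: rest => (String.ofList a, String.ofList (List.intercalate ['-'] (b :: rest)))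
  | _ => (orig, orig)

-- named tail computations of the two ports (definitionally equal to the ports' bodies)
def tailA (name : String) : String × String :=
  if ((PySem.Str.splitMax? name "-" 1).getD []).length = 2 then
    ((PySem.List.pyGet? ((PySem.Str.splitMax? name "-" 1).getD []) 0).getD "",
     (PySem.List.pyGet? ((PySem.Str.splitMax? name "-" 1).getD []) 1).getD "")
  else (name, name)

def stripB (parts0 : List String) : List String :=
  if 3 ≤ parts0.length ∧
      (PySem.List.pyGet? parts0 (-1) = some "claude" ∨
       PySem.List.pyGet? parts0 (-1) = some "codex" ∨
       PySem.List.pyGet? parts0 (-1) = some "cc")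
  then PySem.List.slice parts0 none (some (-1)) else parts0

def tailB (orig : String) (parts : List String) : String × String :=
  if 2 ≤ parts.length then
    ((PySem.List.pyGet? parts 0).getD "", PySem.Str.join "-" (PySem.List.slice parts (some 1) none))
  else (orig, orig)

theorem dash_toList : ("-" : String).toList = ['-'] := by decide

theorem spA_ne_nil (s : List Char) : spA s ≠ [] := by
  induction s with
  | nil => simp [spA]
  | cons c t ih =>
    by_cases hc : c = '-'
    · simp [spA, hc]
    · cases h : spA t with
      | nil => simp [spA, hc, h]
      | cons p ps => simp [spA, hc, h]

theorem intercalate_cons₂ (p q : List Char) (ps : List (List Char)) :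
    List.intercalate ['-'] (p :: q :: ps) = p ++ '-' :: List.intercalate ['-'] (q :: ps) := by
  simp [List.intercalate, List.intersperse]

theorem join_spA (s : List Char) : List.intercalate ['-'] (spA s) = s := by
  induction s with
  | nil => simp [spA, List.intercalate]
  | cons c t ih =>
    by_cases hc : c = '-'
    · cases h : spA t with
      | nil => exact absurd h (spA_ne_nil t)
      | cons p ps =>
        rw [h] at ih
        simp [spA, hc, intercalate_cons₂, ih, h]
    · cases h : spA t with
      | nil => exact absurd h (spA_ne_nil t)
      | cons p ps =>
        rw [h] at ih
        cases ps with
        | nil =>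
          simp [List.intercalate] at ih
          simp [spA, hc, h, List.intercalate, ih]
        | cons q qs =>
          rw [intercalate_cons₂] at ih
          simp [spA, hc, h, intercalate_cons₂, ih]

theorem spA_sp1 (s : List Char) :
    spA s = match (sp1 s).2 with
            | none => [(sp1 s).1]
            | some r => (sp1 s).1 :: spA r := by
  induction s with
  | nil => simp [spA, sp1]
  | cons c t ih =>
    by_cases hc : c = '-'
    · simp [spA, sp1, hc]
    · cases hr : (sp1 t).2 with
      | none =>
        rw [hr] at ih
        simp [spA, sp1, hc, hr, ih]
      | some r =>
        rw [hr] at ih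
        cases h : spA r with
        | nil => exact absurd h (spA_ne_nil r)
        | cons p ps => simp [spA, sp1, hc, hr, ih, h]

theorem sp1_none_iff (s : List Char) : (sp1 s).2 = none ↔ '-' ∉ s := by
  induction s with
  | nil => simp [sp1]
  | cons c t ih =>
    by_cases hc : c = '-'
    · simp [sp1, hc]
    · simp [sp1, hc, ih, Ne.symm hc]

theorem spA_no_dash (s : List Char) (h : '-' ∉ s) : spA s = [s] := by
  induction s with
  | nil => simp [spA]
  | cons c t ih =>
    simp only [List.mem_cons, not_or] at h
    have hc : ¬ c = '-' := fun hc => h.1 hc.symm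
    simp [spA, hc, ih h.2]

theorem spA_append (u t : List Char) (h : '-' ∉ t) :
    spA (u ++ '-' :: t) = spA u ++ [t] := by
  induction u with
  | nil => simp [spA, spA_no_dash t h]
  | cons c u ih =>
    by_cases hc : c = '-'
    · simp [spA, hc, ih]
    · cases hu : spA u with
      | nil => exact absurd hu (spA_ne_nil u)
      | cons q qs =>
        rw [hu] at ih
        simp [spA, hc, ih, hu]

theorem two_le_spA_iff (s : List Char) : 2 ≤ (spA s).length ↔ '-' ∈ s := by
  cases hr : (sp1 s).2 with
  | none =>
    rw [spA_sp1 s, hr]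
    simpa using (sp1_none_iff s).1 hr
  | some r =>
    rw [spA_sp1 s, hr]
    constructor
    · intro _
      by_contra hmem
      exact (by simp [(sp1_none_iff s).2 hmem] at hr)
    · intro _
      cases h : spA r with
      | nil => exact absurd h (spA_ne_nil r)
      | cons p ps => simp [h]

theorem go_spec (fuel : Nat) (s cur : List Char) (acc : List (List Char))
    (p : List Char) (ps : List (List Char)) (hspA : spA s = p :: ps) (hf : s.length < fuel) :
    PySem.Chars.splitOn.go ['-'] fuel s cur acc = acc.reverse ++ (cur.reverse ++ p) :: ps := by
  induction fuel generalizing s cur acc p ps with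
  | zero => exact absurd hf (Nat.not_lt_zero _)
  | succ fuel ih =>
    cases s with
    | nil =>
      have hA : ([] : List Char) :: ([] : List (List Char)) = p :: ps := by
        rw [← hspA]; simp [spA]
      obtain ⟨hp, hps⟩ := List.cons.inj hA
      simp [PySem.Chars.splitOn.go, ← hp, ← hps]
    | cons c rest =>
      have hfr : rest.length < fuel := by simp only [List.length_cons] at hf; omega
      by_cases hc : c = '-'
      · subst hc
        have hA : ([] : List Char) :: spA rest = p :: ps := by
          rw [← hspA]; simp [spA]
        obtain ⟨hp, hps⟩ := List.cons.inj hA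
        cases h : spA rest with
        | nil => exact absurd h (spA_ne_nil rest)
        | cons q qs =>
          rw [show PySem.Chars.splitOn.go ['-'] (fuel+1) ('-'::rest) cur acc =
                PySem.Chars.splitOn.go ['-'] fuel rest [] (cur.reverse :: acc) from by
              simp [PySem.Chars.splitOn.go, List.isPrefixOf]]
          rw [ih rest [] (cur.reverse :: acc) q qs h hfr]
          rw [← hp, ← hps, h]
          simp
      · cases h : spA rest with
        | nil => exact absurd h (spA_ne_nil rest)
        | cons q qs =>
          have hA : (c :: q) :: qs = p :: ps := by
            rw [← hspA]; simp [spA, hc, h]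
          obtain ⟨hp, hps⟩ := List.cons.inj hA
          rw [show PySem.Chars.splitOn.go ['-'] (fuel+1) (c::rest) cur acc =
                PySem.Chars.splitOn.go ['-'] fuel rest (c :: cur) acc from by
              simp [PySem.Chars.splitOn.go, List.isPrefixOf, Ne.symm hc]]
          rw [ih rest (c :: cur) acc q qs h hfr]
          rw [← hp, ← hps]
          simp

theorem splitOn_spA (s : List Char) : PySem.Chars.splitOn s ['-'] = spA s := by
  cases h : spA s with
  | nil => exact absurd h (spA_ne_nil s)
  | cons p ps =>
    rw [PySem.Chars.splitOn, go_spec (s.length+1) s [] [] p ps h (by omega)]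
    simp

theorem goMax0 (fuel : Nat) (l cur : List Char) (acc : List (List Char)) :
    PySem.Chars.splitOnMax.go ['-'] fuel 0 l cur acc = acc.reverse ++ [cur.reverse ++ l] := by
  cases fuel with
  | zero => simp [PySem.Chars.splitOnMax.go]
  | succ fuel =>
    cases l with
    | nil => simp [PySem.Chars.splitOnMax.go]
    | cons c rest => simp [PySem.Chars.splitOnMax.go]

theorem goMax1 (fuel : Nat) (s cur : List Char) (acc : List (List Char)) (hf : s.length < fuel) :
    PySem.Chars.splitOnMax.go ['-'] fuel 1 s cur acc =
      match (sp1 s).2 with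
      | none => acc.reverse ++ [cur.reverse ++ (sp1 s).1]
      | some r => acc.reverse ++ [cur.reverse ++ (sp1 s).1, r] := by
  induction fuel generalizing s cur acc with
  | zero => exact absurd hf (Nat.not_lt_zero _)
  | succ fuel ih =>
    cases s with
    | nil => simp [PySem.Chars.splitOnMax.go, sp1]
    | cons c rest =>
      have hfr : rest.length < fuel := by simp only [List.length_cons] at hf; omega
      by_cases hc : c = '-'
      · subst hc
        rw [show PySem.Chars.splitOnMax.go ['-'] (fuel+1) 1 ('-'::rest) cur acc =
              PySem.Chars.splitOnMax.go ['-'] fuel 0 rest [] (cur.reverse :: acc) from by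
            simp [PySem.Chars.splitOnMax.go, List.isPrefixOf]]
        rw [goMax0]
        simp [sp1]
      · rw [show PySem.Chars.splitOnMax.go ['-'] (fuel+1) 1 (c::rest) cur acc =
              PySem.Chars.splitOnMax.go ['-'] fuel 1 rest (c :: cur) acc from by
            simp [PySem.Chars.splitOnMax.go, List.isPrefixOf, Ne.symm hc]]
        rw [ih rest (c :: cur) acc hfr]
        cases hr : (sp1 rest).2 with
        | none => simp [sp1, hc, hr]
        | some r => simp [sp1, hc, hr]

theorem splitOnMax_one (s : List Char) :
    PySem.Chars.splitOnMax s ['-'] 1 =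
      match (sp1 s).2 with
      | none => [(sp1 s).1]
      | some r => [(sp1 s).1, r] := by
  have h0 : PySem.Chars.splitOnMax s ['-'] 1 =
      PySem.Chars.splitOnMax.go ['-'] (s.length + 1) 1 s [] [] := by
    simp [PySem.Chars.splitOnMax]
  rw [h0, goMax1 (s.length+1) s [] [] (by omega)]
  cases hr : (sp1 s).2 with
  | none => simp
  | some r => simp

theorem slice_neg_suffix {α : Type} (u v : List α) (hv : v ≠ []) :
    PySem.List.slice (u ++ v) none (some (-(v.length : Int))) = u := by
  have hvpos : 0 < v.length := List.length_pos_iff.2 hv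
  have h1 : PySem.List.clampIdx (u ++ v).length (-(v.length : Int)) = u.length := by
    unfold PySem.List.clampIdx
    simp only [List.length_append]
    split_ifs <;> omega
  simp only [PySem.List.slice, h1]
  simp

theorem slice_dropLast {α : Type} (xs : List α) :
    PySem.List.slice xs none (some (-1)) = xs.dropLast := by
  have h1 : PySem.List.clampIdx xs.length (-1) = xs.length - 1 := by
    unfold PySem.List.clampIdx
    split_ifs <;> omega
  simp only [PySem.List.slice, h1]
  simp [List.dropLast_eq_take]

theorem slice_one {α : Type} (xs : List α) :
    PySem.List.slice xs (some 1) none = xs.drop 1 := by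
  cases xs with
  | nil => simp [PySem.List.slice, PySem.List.clampIdx]
  | cons a l => simp [PySem.List.slice, PySem.List.clampIdx]

theorem pyGet?_last {α : Type} (l : List α) (x : α) :
    PySem.List.pyGet? (l ++ [x]) (-1) = some x := by
  simp [PySem.List.pyGet?, PySem.List.pyIdx?]

theorem isIn_dash (u : List Char) : PySem.Chars.isIn ['-'] u = true ↔ '-' ∈ u := by
  rw [PySem.Chars.isIn_iff_infix]
  constructor
  · intro h
    exact List.singleton_sublist.mp h.sublist
  · intro h
    obtain ⟨l1, l2, rfl⟩ := List.append_of_mem h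
    exact ⟨l1, l2, by simp⟩

theorem intercalate_snoc (p0 : List Char) (ps : List (List Char)) (q : List Char) :
    List.intercalate ['-'] ((p0 :: ps) ++ [q]) = List.intercalate ['-'] (p0 :: ps) ++ '-' :: q := by
  induction ps generalizing p0 with
  | nil => simp [List.intercalate]
  | cons p1 ps ih =>
    rw [show (p0 :: p1 :: ps) ++ [q] = p0 :: p1 :: (ps ++ [q]) from by simp]
    rw [intercalate_cons₂]
    rw [show p1 :: (ps ++ [q]) = (p1 :: ps) ++ [q] from by simp]
    rw [ih p1, intercalate_cons₂]
    simp

-- reconstruction: a split with last piece q and ≥ 2 pieces means s ends with '-' :: q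
theorem endswith_of_spA (s q : List Char) (ps : List (List Char))
    (h : spA s = ps ++ [q]) (hps : ps ≠ []) : ('-' :: q) <:+ s := by
  cases ps with
  | nil => exact absurd rfl hps
  | cons p0 ps' =>
    refine ⟨List.intercalate ['-'] (p0 :: ps'), ?_⟩
    conv_rhs => rw [← join_spA s, h]
    rw [intercalate_snoc]

-- A's tail (split-once + len test) equals canon of the full split
theorem tailA_eq (name : String) : tailA name = canon name (spA name.toList) := by
  have hsm : PySem.Str.splitMax? name "-" 1 =
      some ((PySem.Chars.splitOnMax name.toList ['-'] 1).map String.ofList) := by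
    simp [PySem.Str.splitMax?, PySem.Chars.splitMax?, dash_toList]
  unfold tailA
  rw [hsm, splitOnMax_one]
  cases hr : (sp1 name.toList).2 with
  | none =>
    rw [spA_sp1 name.toList, hr]
    simp [canon]
  | some r =>
    rw [spA_sp1 name.toList, hr]
    cases h : spA r with
    | nil => exact absurd h (spA_ne_nil r)
    | cons q qs =>
      have hj : List.intercalate ['-'] (q :: qs) = r := by rw [← h, join_spA]
      simp [canon, h, hj, PySem.List.pyGet?, PySem.List.pyIdx?]

-- B's tail equals canon of the piece list it holds
theorem tailB_eq (orig : String) (qs : List (List Char)) :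
    tailB orig (qs.map String.ofList) = canon orig qs := by
  unfold tailB
  cases qs with
  | nil => simp [canon]
  | cons a qs' =>
    cases qs' with
    | nil => simp [canon]
    | cons b rest =>
      rw [slice_one]
      have hmm : List.map (String.toList ∘ String.ofList) rest = rest := by
        simp [Function.comp_def]
      have hpos : (0 : Int) ≤ (rest.length : Int) + 1 := by positivity
      simp [canon, PySem.Str.join, PySem.Chars.join, dash_toList,
            PySem.List.pyGet?, PySem.List.pyIdx?, hmm, hpos]

theorem canon_indep (o1 o2 : String) (qs : List (List Char)) (h : 2 ≤ qs.length) :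
    canon o1 qs = canon o2 qs := by
  cases qs with
  | nil => simp at h
  | cons a t =>
    cases t with
    | nil => simp at h
    | cons b rest => simp [canon]

theorem end_shape (session tool suf : String)
    (hsuf : suf.toList = '-' :: tool.toList)
    (hend : PySem.Str.endswith session suf = true) :
    ∃ u, session.toList = u ++ '-' :: tool.toList := by
  simp only [PySem.Str.endswith] at hend
  obtain ⟨u, hu⟩ := (PySem.Chars.endswith_iff session.toList suf.toList).1 hend
  exact ⟨u, by rw [← hu, hsuf]⟩

theorem endswith_of_last (session tool suf : String)
    (hsuf : suf.toList = '-' :: tool.toList)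
    (h3 : 3 ≤ ((spA session.toList).map String.ofList).length)
    (hlast : PySem.List.pyGet? ((spA session.toList).map String.ofList) (-1) = some tool) :
    PySem.Str.endswith session suf = true := by
  obtain h | ⟨ps, q, hps⟩ := List.eq_nil_or_concat (spA session.toList)
  · exact absurd h (spA_ne_nil _)
  · rw [List.concat_eq_append] at hps
    have hmap : (spA session.toList).map String.ofList
        = ps.map String.ofList ++ [String.ofList q] := by simp [hps]
    rw [hmap, pyGet?_last] at hlast
    have hq : q = tool.toList := by
      have h' := congrArg String.toList (Option.some.inj hlast)
      simpa using h'
    have hps_ne : ps ≠ [] := by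
      intro h0
      rw [hps, h0] at h3
      simp at h3
    have hsuffix := endswith_of_spA session.toList q ps hps hps_ne
    simp only [PySem.Str.endswith]
    rw [hsuf, ← hq]
    exact (PySem.Chars.endswith_iff _ _).2 hsuffix

theorem candidate_eq (session tool suf : String) (u : List Char)
    (hsuf : suf.toList = '-' :: tool.toList)
    (hu : session.toList = u ++ '-' :: tool.toList) :
    PySem.Str.slice session none (some (-(PySem.Str.len suf))) = String.ofList u := by
  have h := slice_neg_suffix u ('-' :: tool.toList) (by simp)
  rw [show PySem.Str.slice session none (some (-(PySem.Str.len suf))) =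
        String.ofList (PySem.List.slice session.toList none (some (-(suf.toList.length : Int)))) from by
      simp [PySem.Str.slice, PySem.Str.len]]
  rw [hu, hsuf]
  exact congrArg String.ofList h

theorem matched_case (session tool suf : String)
    (hsuf : suf.toList = '-' :: tool.toList) (hd : '-' ∉ tool.toList)
    (hend : PySem.Str.endswith session suf = true)
    (htool : tool = "claude" ∨ tool = "codex" ∨ tool = "cc") :
    tailA (if PySem.Str.isIn "-" (PySem.Str.slice session none (some (-(PySem.Str.len suf)))) = true
           then PySem.Str.slice session none (some (-(PySem.Str.len suf))) else session)
    = tailB session (stripB ((spA session.toList).map String.ofList)) := by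
  obtain ⟨u, hu⟩ := end_shape session tool suf hsuf hend
  have hcand := candidate_eq session tool suf u hsuf hu
  rw [hcand]
  have hspAs : spA session.toList = spA u ++ [tool.toList] := by
    rw [hu]; exact spA_append u _ hd
  have hIn : PySem.Str.isIn "-" (String.ofList u) = PySem.Chars.isIn ['-'] u := by
    simp [PySem.Str.isIn, dash_toList]
  have hmap : (spA session.toList).map String.ofList
      = (spA u).map String.ofList ++ [tool] := by
    rw [hspAs]
    simp [String.ofList_toList]
  by_cases hm : '-' ∈ u
  · rw [if_pos (by rw [hIn]; exact (isIn_dash u).2 hm)]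
    rw [tailA_eq, String.toList_ofList]
    have h2u : 2 ≤ (spA u).length := (two_le_spA_iff u).2 hm
    rw [hmap]
    have hlen : 3 ≤ ((spA u).map String.ofList ++ [tool]).length := by
      simp only [List.length_append, List.length_map, List.length_cons, List.length_nil]
      omega
    have hlast : PySem.List.pyGet? ((spA u).map String.ofList ++ [tool]) (-1) = some tool :=
      pyGet?_last _ _
    rw [show stripB ((spA u).map String.ofList ++ [tool]) = (spA u).map String.ofList from by
      unfold stripB
      rw [if_pos ⟨hlen, by
        rcases htool with rfl | rfl | rfl
        · exact Or.inl hlast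
        · exact Or.inr (Or.inl hlast)
        · exact Or.inr (Or.inr hlast)⟩]
      rw [slice_dropLast]
      exact List.dropLast_concat ..]
    rw [tailB_eq]
    exact canon_indep _ _ _ h2u
  · rw [if_neg (by rw [hIn]; simp [isIn_dash u, hm])]
    rw [tailA_eq]
    have hAu : spA u = [u] := spA_no_dash u hm
    rw [show stripB ((spA session.toList).map String.ofList) = (spA session.toList).map String.ofList from by
      unfold stripB
      rw [if_neg]
      rw [hmap, hAu]
      rintro ⟨h3le, -⟩
      simp at h3le]
    rw [tailB_eq]

theorem unmatched_case (session : String)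
    (h1 : ¬ PySem.Str.endswith session "-claude" = true)
    (h2 : ¬ PySem.Str.endswith session "-codex" = true)
    (h3 : ¬ PySem.Str.endswith session "-cc" = true) :
    tailA session = tailB session (stripB ((spA session.toList).map String.ofList)) := by
  rw [show stripB ((spA session.toList).map String.ofList) = (spA session.toList).map String.ofList from by
    unfold stripB
    rw [if_neg]
    rintro ⟨h3le, hor⟩
    rcases hor with h | h | h
    · exact h1 (endswith_of_last session "claude" "-claude" (by decide) h3le h)
    · exact h2 (endswith_of_last session "codex" "-codex" (by decide) h3le h)
    · exact h3 (endswith_of_last session "cc" "-cc" (by decide) h3le h)]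
  rw [tailA_eq, tailB_eq]

-- ===== VERDICT (by name: the statement is the Claim_ definition above) =====
theorem parse_session_name_py_spec : Claim_equal_parse_session_name_py := by
  intro session _
  unfold Spec_parse_session_name_py
  have hA : parse_session_name_py session
      = tailA (pvStripLoop ["-claude", "-codex", "-cc"] session) := rfl
  have hB : parse_session_name_py_alt session
      = tailB session (stripB ((PySem.Str.split? session "-").getD [])) := rfl
  have hsp : (PySem.Str.split? session "-").getD [] = (spA session.toList).map String.ofList := by
    simp [PySem.Str.split?, PySem.Chars.split?, dash_toList, splitOn_spA]
  rw [hA, hB, hsp]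
  by_cases h1 : PySem.Str.endswith session "-claude" = true
  · rw [show pvStripLoop ["-claude", "-codex", "-cc"] session
        = (if PySem.Str.isIn "-" (PySem.Str.slice session none (some (-(PySem.Str.len "-claude")))) = true
           then PySem.Str.slice session none (some (-(PySem.Str.len "-claude"))) else session) from by
      simp only [pvStripLoop]
      rw [if_pos h1]]
    exact matched_case session "claude" "-claude" (by decide) (by decide) h1 (Or.inl rfl)
  · by_cases h2 : PySem.Str.endswith session "-codex" = true
    · rw [show pvStripLoop ["-claude", "-codex", "-cc"] session
          = (if PySem.Str.isIn "-" (PySem.Str.slice session none (some (-(PySem.Str.len "-codex")))) = true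
             then PySem.Str.slice session none (some (-(PySem.Str.len "-codex"))) else session) from by
        simp only [pvStripLoop]
        rw [if_neg h1, if_pos h2]]
      exact matched_case session "codex" "-codex" (by decide) (by decide) h2 (Or.inr (Or.inl rfl))
    · by_cases h3 : PySem.Str.endswith session "-cc" = true
      · rw [show pvStripLoop ["-claude", "-codex", "-cc"] session
            = (if PySem.Str.isIn "-" (PySem.Str.slice session none (some (-(PySem.Str.len "-cc")))) = true
               then PySem.Str.slice session none (some (-(PySem.Str.len "-cc"))) else session) from by
          simp only [pvStripLoop]
          rw [if_neg h1, if_neg h2, if_pos h3]]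
        exact matched_case session "cc" "-cc" (by decide) (by decide) h3 (Or.inr (Or.inr rfl))
      · rw [show pvStripLoop ["-claude", "-codex", "-cc"] session = session from by
          simp only [pvStripLoop]
          rw [if_neg h1, if_neg h2, if_neg h3]]
        exact unmatched_case session h1 h2 h3
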